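-- pv_equiv track=rewrite | github.com/shevdan/Algo-DataStructures-sem8 | sem8/task3.py | solve
-- ===== SOURCE A (Python) =====
-- def solve(r_lst):
--     r = sorted(r_lst, reverse=True)
--
--     first_idx = {}
--     for i in range(len(r_lst)):
--         first_idx[r_lst[i]] = i
--
--
--     license = []
--     for i in range(len(r)):
--         license.append(first_idx[r[i]])
--
--     return license
-- ===== SOURCE B (Python) =====
-- def solve(r_lst):
--     last = {}
--     for i, v in enumerate(r_lst):
--         last[v] = i
--     out = []
--     remaining = r_lst
--     while remaining:
--         m = max(remaining)
--         out += [last[m]] * remaining.count(m)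
--         remaining = [x for x in remaining if x != m]
--     return out
-- ===== Notes on version B (the rewrite author's own statement) =====
-- stated objective: alternative
-- what changed: B replaces A's sort of the whole list by a selection loop: after one pass recording each value's last index, it repeatedly takes the max of the remaining elements, emits that value's last index count-many times, and filters the value out; no sort is performed at all.
import Mathlib
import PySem

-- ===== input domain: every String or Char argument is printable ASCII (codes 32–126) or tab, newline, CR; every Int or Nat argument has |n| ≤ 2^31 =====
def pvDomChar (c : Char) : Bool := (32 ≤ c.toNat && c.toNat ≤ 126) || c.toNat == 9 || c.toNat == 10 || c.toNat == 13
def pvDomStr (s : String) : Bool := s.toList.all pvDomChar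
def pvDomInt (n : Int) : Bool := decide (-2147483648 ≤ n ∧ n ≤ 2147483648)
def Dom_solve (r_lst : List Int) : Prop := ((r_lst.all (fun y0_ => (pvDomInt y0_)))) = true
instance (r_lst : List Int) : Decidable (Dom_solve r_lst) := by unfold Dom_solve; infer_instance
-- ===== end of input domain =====

-- B replaces A's "sort everything, then look each element up" by a sort-free selection
-- loop: record each value's last index in one pass, then repeatedly take the max of the
-- remaining elements, emit its last index count-many times, and filter it out
-- (objective: alternative algorithm — selection by repeated max instead of sorting).

-- ===== PORT A =====
-- r = sorted(r_lst, reverse=True); first_idx[r_lst[i]] = i for i in range(len(r_lst));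
-- license.append(first_idx[r[i]]) for i in range(len(r)).  The lookup first_idx[r[i]]
-- can never raise (every element of r is an element of r_lst, hence a key), so it is
-- ported as getD with default 0.
def solve (r_lst : List Int) : List Int :=
  let r := PySem.List.sorted r_lst (fun x => x) true
  let first_idx := (PySem.List.pyRange 0 (PySem.List.len r_lst)).foldl
      (fun d i => d.insert (PySem.List.pyGetD r_lst i 0) i) PySem.Dict.empty
  (PySem.List.pyRange 0 (PySem.List.len r)).foldl
      (fun acc i => acc ++ [first_idx.getD (PySem.List.pyGetD r i 0) 0]) []

-- ===== PORT B =====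
-- termination fact for the while loop: filtering out the max (a member) shrinks the list
lemma pvFilterMaxLt (l : List Int) (m : Int) (h : m ∈ l) :
    (l.filter (fun x => !(x == m))).length < l.length :=
  List.length_filter_lt_length_iff_exists.2 ⟨m, h, by simp⟩

-- while remaining: m = max(remaining); out += [last[m]] * remaining.count(m);
-- remaining = [x for x in remaining if x != m].  max(remaining) is total here because the
-- while-test guarantees remaining is nonempty (max? = none is exactly the empty case);
-- last[m] can never raise (m ∈ r_lst is a key), so it is ported as getD with default 0.
def solveAltLoop (last : PySem.Dict Int Int) (out : List Int) (remaining : List Int) :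
    List Int :=
  match h : PySem.List.max? remaining (fun x => x) with
  | none => out
  | some m =>
      solveAltLoop last
        (out ++ PySem.List.pyRepeat [last.getD m 0] ((PySem.List.count remaining m : Int)))
        (remaining.filter (fun x => !(x == m)))
  termination_by remaining.length
  decreasing_by
    rw [List.unattach_filter (g := fun x => !(x == m)) (hf := fun x hx => rfl),
      List.unattach_attach]
    exact pvFilterMaxLt remaining m (PySem.List.max?_mem h)

def solve_alt (r_lst : List Int) : List Int :=
  let last := (PySem.List.enumerate r_lst).foldl
      (fun (d : PySem.Dict Int Int) iv => d.insert iv.2 iv.1) PySem.Dict.empty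
  solveAltLoop last [] r_lst

-- ===== PRECONDITION & SPEC =====
def Spec_solve (r_lst : List Int) (out : List Int) : Prop := out = solve_alt r_lst
instance (r_lst : List Int) (out : List Int) : Decidable (Spec_solve r_lst out) := by unfold Spec_solve; infer_instance

-- ===== CLAIM (what is proved, stated in full; the proofs are below) =====
def Claim_equal_solve : Prop := ∀ (r_lst : List Int), Dom_solve r_lst → Spec_solve r_lst (solve r_lst)

-- ===== LEMMAS AND PROOFS =====

-- peeling the maximum off a descending sort: sorted(ys, reverse=True) is the max value
-- repeated its multiplicity, followed by the descending sort of the remaining elements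
lemma sorted_rev_max_peel (ys : List Int) (m : Int)
    (h : PySem.List.max? ys (fun x => x) = some m) :
    PySem.List.sorted ys (fun x => x) true
      = List.replicate (ys.count m) m
          ++ PySem.List.sorted (ys.filter (fun x => !(x == m))) (fun x => x) true := by
  have hmax : ∀ y ∈ ys, y ≤ m := PySem.List.max?_isMax h
  have hperm : (PySem.List.sorted ys (fun x => x) true).Perm
      (List.replicate (ys.count m) m
        ++ PySem.List.sorted (ys.filter (fun x => !(x == m))) (fun x => x) true) := by
    rw [List.perm_iff_count]
    intro a
    rw [(PySem.List.sorted_perm ys (fun x => x) true).count_eq, List.count_append,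
      (PySem.List.sorted_perm _ (fun x => x) true).count_eq, List.count_replicate]
    by_cases ham : a = m
    · subst ham
      simp [List.count_eq_zero]
    · rw [List.count_filter (by simp [ham])]
      have hma : ¬ (m = a) := fun hh => ham hh.symm
      simp [hma]
  refine PySem.List.eq_of_perm_of_pairwise_le_of_injective (fun x : Int => -x)
    neg_injective hperm ?_ ?_
  · exact (PySem.List.sorted_pairwise_rev ys (fun x => x)).imp
      (by intro a b; simp only []; omega)
  · refine List.pairwise_append.2 ⟨?_, ?_, ?_⟩
    · exact List.pairwise_replicate.2 (Or.inr le_rfl)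
    · exact (PySem.List.sorted_pairwise_rev _ (fun x => x)).imp
        (by intro a b; simp only []; omega)
    · intro x hx y hy
      have hxm : x = m := List.eq_of_mem_replicate hx
      have hym : y ∈ ys := List.mem_of_mem_filter ((PySem.List.mem_sorted _ _ _ _).1 hy)
      have := hmax y hym
      simp only []
      omega

-- the selection loop computes the descending sort of the remaining elements, each mapped
-- through the last-index dictionary, appended to the accumulator
lemma solveAltLoop_eq (d : PySem.Dict Int Int) (ys out : List Int) :
    solveAltLoop d out ys
      = out ++ (PySem.List.sorted ys (fun x => x) true).map (fun v => d.getD v 0) := by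
  induction hn : ys.length using Nat.strong_induction_on generalizing ys out with
  | _ n ih =>
    unfold solveAltLoop
    split
    next h =>
        have : ys = [] := (PySem.List.max?_eq_none_iff ys (fun x => x)).1 h
        subst this
        simp [PySem.List.sorted]
    next m h =>
        have hlt : (ys.filter (fun x => !(x == m))).length < n :=
          hn ▸ pvFilterMaxLt ys m (PySem.List.max?_mem h)
        rw [ih _ hlt _ _ rfl, sorted_rev_max_peel ys m h, List.map_append,
          List.map_replicate, PySem.List.pyRepeat_singleton, List.append_assoc,
          PySem.List.count_eq, Int.toNat_natCast]

-- ===== VERDICT (by name: the statement is the Claim_ definition above) =====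
theorem solve_spec : Claim_equal_solve := by
  intro xs _
  show solve xs = solve_alt xs
  unfold solve solve_alt
  simp only []
  -- A's index-loop dict is B's enumerate-loop dict
  have hdict : (PySem.List.pyRange 0 (PySem.List.len xs)).foldl
      (fun d i => d.insert (PySem.List.pyGetD xs i 0) i) PySem.Dict.empty
      = (PySem.List.enumerate xs).foldl
          (fun (d : PySem.Dict Int Int) iv => d.insert iv.2 iv.1) PySem.Dict.empty := by
    rw [PySem.List.enumerate_eq_map_pyRange xs 0, List.foldl_map]
  rw [hdict, solveAltLoop_eq, List.nil_append,
    PySem.List.foldl_pyRange_zero_pyGetD (PySem.List.sorted xs (fun x => x) true) 0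
      (fun acc x => acc ++ [((PySem.List.enumerate xs).foldl
        (fun (d : PySem.Dict Int Int) iv => d.insert iv.2 iv.1)
        PySem.Dict.empty).getD x 0]) [],
    PySem.List.foldl_append_singleton_eq_map, List.nil_append]
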